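-- pv_equiv track=rewrite | github.com/joaco1212004/TP_ACSO | TP2-x86_64/bombs/bomb52/py.py | cuenta
-- ===== SOURCE A (Python) =====
-- def cuenta(palabra, palabras, izq, der, contador=0):
--     """Simula la función cuenta del ensamblador, implementando búsqueda binaria"""
--     # Incrementar el contador con cada llamada
--     contador += 1
--
--     # Verificar que el contador no exceda 11 (como en la bomba)
--     if contador > 11:
--         return -1  # Simulando explosión
--
--     # Calcular medio usando la lógica del ensamblador
--     medio = (izq ^ der) >> 1
--     medio += (izq & der)
--
--     # Comparar la palabra con la palabra en la posición medio
--     comparacion = (palabra == palabras[medio])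
--
--     # Si la encuentra, retornar el contador
--     if comparacion:
--         return contador
--
--     # Lógica de búsqueda binaria similar a la implementada en cuenta
--     if palabra < palabras[medio] and izq < medio:
--         return cuenta(palabra, palabras, izq, medio-1, contador)
--     elif palabra > palabras[medio] and medio < der:
--         return cuenta(palabra, palabras, medio+1, der, contador)
--
--     # No encontró la palabra
--     return -1
-- ===== SOURCE B (Python) =====
-- def cuenta(palabra, palabras, izq, der, contador=0):
--     """Busqueda binaria como bucle for acotado sobre el presupuesto de llamadas
--     restante (paso = numero de llamada), con punto medio izq + (der-izq)//2 y
--     estrechamiento seguido de chequeo de rango vacio."""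
--     for paso in range(contador + 1, 12):
--         medio = izq + (der - izq) // 2
--         actual = palabras[medio]
--         if palabra == actual:
--             return paso
--         if palabra < actual:
--             der = medio - 1
--         else:
--             izq = medio + 1
--         if izq > der:
--             return -1
--     return -1
-- ===== Notes on version B (the rewrite author's own statement) =====
-- stated objective: alternative
-- what changed: The tail recursion with the assembler xor/and/shift midpoint and asymmetric pre-recursion guards becomes a bounded for-loop over range(contador+1,12) (the remaining call budget, so the loop variable IS the returned count), with midpoint izq+(der-izq)//2 and narrow-then-check-empty-range logic.
-- outside the precondition, e.g. on cuenta('b', ['a', 'b'], -1, -1, 0): A returns 1, B returns 1; on cuenta('a', ['b'], 1, 1, 0): A raises IndexError, B raises IndexError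
import Mathlib
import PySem

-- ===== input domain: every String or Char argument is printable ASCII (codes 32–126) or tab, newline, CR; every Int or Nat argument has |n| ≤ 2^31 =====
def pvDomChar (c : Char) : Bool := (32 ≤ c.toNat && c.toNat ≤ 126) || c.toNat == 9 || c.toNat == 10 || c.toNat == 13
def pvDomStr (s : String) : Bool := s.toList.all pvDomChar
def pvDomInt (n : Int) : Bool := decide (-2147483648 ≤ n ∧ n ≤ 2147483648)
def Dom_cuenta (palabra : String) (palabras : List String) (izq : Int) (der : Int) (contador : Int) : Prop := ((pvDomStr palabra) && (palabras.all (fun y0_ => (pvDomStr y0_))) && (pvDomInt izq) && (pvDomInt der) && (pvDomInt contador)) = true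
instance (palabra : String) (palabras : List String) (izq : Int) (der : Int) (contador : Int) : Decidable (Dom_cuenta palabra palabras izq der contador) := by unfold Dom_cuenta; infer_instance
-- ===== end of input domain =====

-- B replaces A's tail-recursive binary search (assembler xor/and/shift midpoint, asymmetric
-- pre-recursion guards) by a bounded for-loop over the remaining call budget range(contador+1,12),
-- midpoint izq+(der-izq)//2, narrow-then-check-empty; same return values on Pre_.


-- ===== PORT A =====
-- literal transliteration of A: contador += 1; cap 11; medio = ((izq ^ der) >> 1) + (izq & der);
-- palabras[medio] via PySem.List.pyGet? (none = IndexError, excluded by Pre_); tail recursion.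
def cuenta (palabra : String) (palabras : List String) (izq : Int) (der : Int) (contador : Int) : Int :=
  let contador1 := contador + 1
  if contador1 > 11 then -1
  else
    let medio := (PySem.Int.bxor izq der) >>> (1 : Nat) + PySem.Int.band izq der
    match PySem.List.pyGet? palabras medio with
    | none => -1   -- Python raises IndexError here; such inputs are outside Pre_cuenta
    | some w =>
      if palabra == w then contador1
      else if palabra < w ∧ izq < medio then cuenta palabra palabras izq (medio - 1) contador1
      else if w < palabra ∧ medio < der then cuenta palabra palabras (medio + 1) der contador1
      else -1
termination_by (11 - contador).toNat
decreasing_by all_goals omega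

-- ===== PORT B =====
-- B's `for paso in range(contador+1, 12)` loop: structural recursion over the list of paso
-- values, the mutated izq/der carried as arguments; narrowing then the empty-range check.
def cuentaLoop (palabra : String) (palabras : List String) : List Int → Int → Int → Int
  | [], _, _ => -1
  | paso :: rest, izq, der =>
      let medio := izq + PySem.Int.floordiv (der - izq) 2
      match PySem.List.pyGet? palabras medio with
      | none => -1   -- Python raises IndexError here; such inputs are outside Pre_cuenta
      | some actual =>
        if palabra == actual then paso
        else if palabra < actual then
          if izq > medio - 1 then -1 else cuentaLoop palabra palabras rest izq (medio - 1)
        else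
          if medio + 1 > der then -1 else cuentaLoop palabra palabras rest (medio + 1) der

def cuenta_alt (palabra : String) (palabras : List String) (izq : Int) (der : Int) (contador : Int) : Int :=
  cuentaLoop palabra palabras (PySem.List.pyRange (contador + 1) 12 1) izq der

-- ===== PRECONDITION & SPEC =====
-- Pre_ excludes out-of-range / negative search bounds (unless the call cap already fires):
-- there Python either raises IndexError or reaches values only through accidental
-- negative-index wraparound; inside Pre_ every probe index is in range.
def Pre_cuenta (palabra : String) (palabras : List String) (izq : Int) (der : Int) (contador : Int) : Prop :=
  11 ≤ contador ∨ (0 ≤ izq ∧ izq ≤ der ∧ der < (palabras.length : Int))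
instance (palabra : String) (palabras : List String) (izq : Int) (der : Int) (contador : Int) : Decidable (Pre_cuenta palabra palabras izq der contador) := by unfold Pre_cuenta; infer_instance

def pvWitness_cuenta : String × List String × Int × Int × Int := ("b", ["a", "b", "c"], 0, 2, 0)

def Spec_cuenta (palabra : String) (palabras : List String) (izq : Int) (der : Int) (contador : Int) (out : Int) : Prop := out = cuenta_alt palabra palabras izq der contador
instance (palabra : String) (palabras : List String) (izq : Int) (der : Int) (contador : Int) (out : Int) : Decidable (Spec_cuenta palabra palabras izq der contador out) := by unfold Spec_cuenta; infer_instance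

-- ===== CLAIM (what is proved, stated in full; the proofs are below) =====
def Claim_equal_cuenta : Prop := ∀ (palabra : String) (palabras : List String) (izq : Int) (der : Int) (contador : Int), Dom_cuenta palabra palabras izq der contador → Pre_cuenta palabra palabras izq der contador → Spec_cuenta palabra palabras izq der contador (cuenta palabra palabras izq der contador)

-- ===== LEMMAS AND PROOFS =====

-- bit identity m + n = (m ^^^ n) + 2 * (m &&& n), needed to equate the midpoints
theorem pv_and_mod_two (a b : Nat) : (a &&& b) % 2 = (a % 2) * (b % 2) := by
  have h := Nat.testBit_and a b 0
  simp only [Nat.testBit_zero] at h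
  rcases Nat.mod_two_eq_zero_or_one a with ha | ha <;>
    rcases Nat.mod_two_eq_zero_or_one b with hb | hb <;>
    rcases Nat.mod_two_eq_zero_or_one (a &&& b) with hc | hc <;>
    simp_all

theorem pv_add_eq_xor_add_two_and : ∀ m n : Nat, m + n = (m ^^^ n) + 2 * (m &&& n) := by
  intro m
  induction m using Nat.strong_induction_on with
  | _ m ih =>
    intro n
    match m, n with
    | 0, n => simp
    | m+1, 0 => simp
    | m+1, n+1 =>
      have h1 := ih ((m+1)/2) (by omega) ((n+1)/2)
      have h2 : ((m+1) ^^^ (n+1)) / 2 = (m+1)/2 ^^^ (n+1)/2 := Nat.xor_div_two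
      have h3 : ((m+1) &&& (n+1)) / 2 = (m+1)/2 &&& (n+1)/2 := Nat.and_div_two
      have h4 : ((m+1) ^^^ (n+1)) % 2 = ((m+1) + (n+1)) % 2 := Nat.xor_mod_two_eq
      have h5 := pv_and_mod_two (m+1) (n+1)
      rcases Nat.mod_two_eq_zero_or_one (m+1) with hm | hm <;>
        rcases Nat.mod_two_eq_zero_or_one (n+1) with hn | hn <;>
        rw [hm, hn] at h5 <;> omega

-- the assembler midpoint ((a ^ b) >> 1) + (a & b) is (a + b) // 2, for nonnegative bounds
theorem pv_medio_eq (a b : Int) (ha : 0 ≤ a) (hb : 0 ≤ b) :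
    (PySem.Int.bxor a b) >>> (1 : Nat) + PySem.Int.band a b = PySem.Int.floordiv (a + b) 2 := by
  obtain ⟨m, rfl⟩ := Int.eq_ofNat_of_zero_le ha
  obtain ⟨n, rfl⟩ := Int.eq_ofNat_of_zero_le hb
  have hx : PySem.Int.bxor (m : Int) (n : Int) = ((m ^^^ n : Nat) : Int) := by simp
  have hA : PySem.Int.band (m : Int) (n : Int) = ((m &&& n : Nat) : Int) := by simp
  have hs : (((m ^^^ n : Nat) : Int)) >>> (1 : Nat) = (((m ^^^ n) / 2 : Nat) : Int) := by
    have : (m ^^^ n) >>> 1 = (m ^^^ n) / 2 := by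
      simp [Nat.shiftRight_eq_div_pow]
    rw [← this]
    simp [Int.shiftRight_eq]
  have hf : PySem.Int.floordiv ((m : Int) + (n : Int)) 2 = (((m + n) / 2 : Nat) : Int) := by
    have : ((m : Int) + (n : Int)) = ((m + n : Nat) : Int) := by push_cast; ring
    rw [this]
    exact_mod_cast PySem.Int.floordiv_natCast (m + n) 2
  rw [hx, hA, hs, hf]
  have h := pv_add_eq_xor_add_two_and m n
  have : (m ^^^ n) / 2 + (m &&& n) = (m + n) / 2 := by omega
  exact_mod_cast congrArg (fun k : Nat => (k : Int)) this

-- B's midpoint izq + (der - izq) // 2 equals (izq + der) // 2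
theorem pv_mid_shift (a b : Int) :
    a + PySem.Int.floordiv (b - a) 2 = PySem.Int.floordiv (a + b) 2 := by
  rw [PySem.Int.floordiv_eq_ediv_of_pos (by omega : (0:Int) < 2),
      PySem.Int.floordiv_eq_ediv_of_pos (by omega : (0:Int) < 2)]
  omega

-- the core equivalence, by induction on the remaining call budget (11 - contador)
theorem pv_aux : ∀ (n : Nat) (palabra : String) (palabras : List String) (izq der contador : Int),
    (11 - contador).toNat = n → 0 ≤ izq → izq ≤ der → der < (palabras.length : Int) →
    cuenta palabra palabras izq der contador
      = cuentaLoop palabra palabras (PySem.List.pyRange (contador + 1) 12 1) izq der := by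
  intro n
  induction n with
  | zero =>
    intro palabra palabras izq der contador hn _ _ _
    have hc : 11 ≤ contador := by omega
    rw [cuenta, PySem.List.pyRange_one_eq_nil (by omega : (12:Int) ≤ contador + 1)]
    simp only
    rw [if_pos (by omega : contador + 1 > 11)]
    rfl
  | succ n ih =>
    intro palabra palabras izq der contador hn h0 hlr hrd
    have hc : contador < 11 := by omega
    rw [PySem.List.pyRange_one_cons (by omega : contador + 1 < 12)]
    have hmidA := pv_medio_eq izq der h0 (le_trans h0 hlr)
    have hmidB := pv_mid_shift izq der
    have hbounds := PySem.Int.floordiv_two_mid_bounds hlr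
    set medio := PySem.Int.floordiv (izq + der) 2 with hm
    have hm0 : 0 ≤ medio := le_trans h0 hbounds.1
    have hmlen : medio < (palabras.length : Int) := lt_of_le_of_lt hbounds.2 hrd
    have hget : PySem.List.pyGet? palabras medio = some palabras[medio.toNat] :=
      PySem.List.pyGet?_eq_some_getElem palabras hm0 hmlen
    rw [cuenta, cuentaLoop]
    simp only [hmidA, hmidB, hget, if_neg (by omega : ¬ contador + 1 > 11)]
    set w := palabras[medio.toNat] with hw
    by_cases heq : palabra == w
    · rw [if_pos heq, if_pos heq]
    · rw [if_neg heq, if_neg heq]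
      have hne : palabra ≠ w := by simpa using heq
      by_cases hlt : palabra < w
      · rw [if_pos hlt]
        by_cases hil : izq < medio
        · rw [if_pos ⟨hlt, hil⟩, if_neg (by omega : ¬ izq > medio - 1)]
          have : contador + 1 + 1 = contador + 1 + 1 := rfl
          exact ih palabra palabras izq (medio - 1) (contador + 1) (by omega) h0 (by omega)
            (by omega)
        · rw [if_neg (by exact fun h => hil h.2), if_pos (by omega : izq > medio - 1),
            if_neg (by exact fun h => absurd h.1 (not_lt_of_gt hlt))]
      · have hgt : w < palabra := by
          rcases lt_trichotomy palabra w with h | h | h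
          · exact absurd h hlt
          · exact absurd h hne
          · exact h
        rw [if_neg (by exact fun h => hlt h.1), if_neg hlt]
        by_cases hmd : medio < der
        · rw [if_pos ⟨hgt, hmd⟩, if_neg (by omega : ¬ medio + 1 > der)]
          exact ih palabra palabras (medio + 1) der (contador + 1) (by omega) (by omega)
            (by omega) hrd
        · rw [if_neg (by exact fun h => hmd h.2), if_pos (by omega : medio + 1 > der)]

-- ===== VERDICT (by name: the statement is the Claim_ definition above) =====
theorem cuenta_spec : Claim_equal_cuenta := by
  intro palabra palabras izq der contador _ hpre
  unfold Spec_cuenta cuenta_alt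
  rcases hpre with hc | ⟨h0, hlr, hrd⟩
  · rw [cuenta, PySem.List.pyRange_one_eq_nil (by omega : (12:Int) ≤ contador + 1)]
    simp only
    rw [if_pos (by omega : contador + 1 > 11)]
    rfl
  · exact pv_aux (11 - contador).toNat palabra palabras izq der contador rfl h0 hlr hrd
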